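-- pv_equiv track=rewrite | github.com/HaloKim/self_study | 1d1c/프로그래머스/# 모의고사.py | solution
-- ===== SOURCE A (Python) =====
-- def solution(answers):
--     ans = []
--     man1 = [1,2,3,4,5]
--     man2 = [2,1,2,3,2,4,2,5]
--     man3 = [3,3,1,1,2,2,4,4,5,5]
--     a1,a2,a3 = 0,0,0
--     for i in range(len(answers)):
--         index = answers[i]
--         if index == man1[i%5]:
--             a1 += 1
--         if index == man2[i%8]:
--             a2 += 1
--         if index == man3[i%10]:
--             a3 += 1
--     m = max(a1,a2,a3)
--     if m == a1:
--         ans.append(1)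
--     if m == a2:
--         ans.append(2)
--     if m == a3:
--         ans.append(3)
--     return ans
-- ===== SOURCE B (Python) =====
-- def solution(answers):
--     # Frequency index: count each (position mod 40, answer) pair once; 40 = lcm of the
--     # three pattern lengths, so every guesser's score is a fixed sum of 40 lookups.
--     freq = {}
--     for i, a in enumerate(answers):
--         key = (i % 40, a)
--         freq[key] = freq.get(key, 0) + 1
--     patterns = [[1, 2, 3, 4, 5], [2, 1, 2, 3, 2, 4, 2, 5], [3, 3, 1, 1, 2, 2, 4, 4, 5, 5]]
--     scores = [sum(freq.get((r, p[r % len(p)]), 0) for r in range(40)) for p in patterns]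
--     m = max(scores)
--     return [j + 1 for j, s in enumerate(scores) if s == m]
-- ===== Notes on version B (the rewrite author's own statement) =====
-- stated objective: alternative
-- what changed: Replaces A's single interleaved counting loop (three counters, unrolled if-appends) by a frequency index: one pass builds a dict counting (position mod 40, answer) pairs (40 = lcm of the pattern lengths), each guesser's score is then a fixed sum of 40 dict lookups, and winners are selected by a comprehension over the score list.
import Mathlib
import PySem

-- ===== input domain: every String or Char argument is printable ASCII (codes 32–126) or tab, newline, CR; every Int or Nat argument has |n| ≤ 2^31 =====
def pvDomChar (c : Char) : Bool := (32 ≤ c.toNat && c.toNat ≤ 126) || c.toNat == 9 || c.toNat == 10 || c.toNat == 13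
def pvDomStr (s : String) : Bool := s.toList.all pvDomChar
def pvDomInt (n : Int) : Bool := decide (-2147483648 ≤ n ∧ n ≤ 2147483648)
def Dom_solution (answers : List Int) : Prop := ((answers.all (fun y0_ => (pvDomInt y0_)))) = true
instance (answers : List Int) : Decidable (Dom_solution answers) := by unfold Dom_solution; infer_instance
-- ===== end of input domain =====

-- B replaces A's single interleaved counting loop plus unrolled if-appends by a frequency
-- dict over (position mod 40, answer) pairs (40 = lcm of the pattern lengths); each score
-- is then a fixed sum of 40 lookups and winners are picked by a comprehension (objective: alternative).

-- ===== PORT A =====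
-- loop body of A's single for-loop over range(len(answers)), with A's three answer keys inline
def solutionStep (answers : List Int) (st : Int × Int × Int) (i : Int) : Int × Int × Int :=
  let index := PySem.List.pyGetD answers i 0
  let st1 := if index = PySem.List.pyGetD [1,2,3,4,5] (PySem.Int.mod i 5) 0 then (st.1 + 1, st.2.1, st.2.2) else st
  let st2 := if index = PySem.List.pyGetD [2,1,2,3,2,4,2,5] (PySem.Int.mod i 8) 0 then (st1.1, st1.2.1 + 1, st1.2.2) else st1
  if index = PySem.List.pyGetD [3,3,1,1,2,2,4,4,5,5] (PySem.Int.mod i 10) 0 then (st2.1, st2.2.1, st2.2.2 + 1) else st2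

def solution (answers : List Int) : List Int :=
  let s := (PySem.List.pyRange 0 (answers.length : Int) 1).foldl (solutionStep answers) ((0, 0, 0) : Int × Int × Int)
  let m := max s.1 (max s.2.1 s.2.2)
  (if m = s.1 then [(1 : Int)] else []) ++ (if m = s.2.1 then [2] else []) ++ (if m = s.2.2 then [3] else [])

-- ===== PORT B =====
-- 'for i, a in enumerate(answers): key = (i % 40, a); freq[key] = freq.get(key, 0) + 1'
def pvFreq (answers : List Int) : PySem.Dict (Int × Int) Int :=
  (PySem.List.enumerate answers).foldl
    (fun d ia =>
      d.insert (PySem.Int.mod ia.1 40, ia.2) (d.getD (PySem.Int.mod ia.1 40, ia.2) 0 + 1))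
    PySem.Dict.empty

-- 'sum(freq.get((r, p[r % len(p)]), 0) for r in range(40))'
def pvDictScore (freq : PySem.Dict (Int × Int) Int) (p : List Int) : Int :=
  ((PySem.List.pyRange 0 40 1).map
    (fun r => freq.getD (r, PySem.List.pyGetD p (PySem.Int.mod r (p.length : Int)) 0) 0)).sum

def solution_alt (answers : List Int) : List Int :=
  let freq := pvFreq answers
  let patterns : List (List Int) := [[1,2,3,4,5], [2,1,2,3,2,4,2,5], [3,3,1,1,2,2,4,4,5,5]]
  let scores := patterns.map (fun p => pvDictScore freq p)
  let m := (PySem.List.max? scores (fun s => s)).getD 0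
  ((PySem.List.enumerate scores).filter (fun js => js.2 == m)).map (fun js => js.1 + 1)

-- ===== PRECONDITION & SPEC =====
def Spec_solution (answers : List Int) (out : List Int) : Prop := out = solution_alt answers
instance (answers : List Int) (out : List Int) : Decidable (Spec_solution answers out) := by unfold Spec_solution; infer_instance

-- ===== CLAIM =====
def Claim_equal_solution : Prop := ∀ (answers : List Int), Dom_solution answers → Spec_solution answers (solution answers)

-- ===== LEMMAS AND PROOFS =====

-- score of one pattern as A counts it: one 0/1 term per answer
def pvScore (answers p : List Int) : Int :=
  ((PySem.List.enumerate answers).map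
    (fun ia => if ia.2 = PySem.List.pyGetD p (PySem.Int.mod ia.1 (p.length : Int)) 0 then (1 : Int) else 0)).sum

lemma pvEnum_append (xs : List Int) (x : Int) (s : Int) :
    PySem.List.enumerate (xs ++ [x]) s = PySem.List.enumerate xs s ++ [((s + xs.length : Int), x)] := by
  induction xs generalizing s with
  | nil => simp [PySem.List.enumerate]
  | cons y ys ih =>
      simp [PySem.List.enumerate, ih]
      ring_nf

lemma pvScore_append (xs : List Int) (x : Int) (p : List Int) :
    pvScore (xs ++ [x]) p
      = pvScore xs p
        + (if x = PySem.List.pyGetD p (PySem.Int.mod (xs.length : Int) (p.length : Int)) 0 then 1 else 0) := by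
  unfold pvScore
  rw [pvEnum_append, List.map_append, List.sum_append]
  simp

lemma pvGetD_append_left (xs : List Int) (x : Int) (i : Int) (h0 : 0 ≤ i) (h1 : i < (xs.length : Int)) :
    PySem.List.pyGetD (xs ++ [x]) i 0 = PySem.List.pyGetD xs i 0 := by
  rw [PySem.List.pyGetD_eq_getElem _ _ h0 (by simp; omega),
      PySem.List.pyGetD_eq_getElem _ _ h0 h1]
  rw [List.getElem_append_left (by omega)]

lemma pvGetD_append_last (xs : List Int) (x : Int) :
    PySem.List.pyGetD (xs ++ [x]) (xs.length : Int) 0 = x := by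
  rw [PySem.List.pyGetD_natCast]
  simp

lemma pvStep_congr (xs : List Int) (x : Int) (st : Int × Int × Int) (i : Int)
    (h0 : 0 ≤ i) (h1 : i < (xs.length : Int)) :
    solutionStep (xs ++ [x]) st i = solutionStep xs st i := by
  unfold solutionStep
  rw [pvGetD_append_left xs x i h0 h1]

lemma pvLoop (xs : List Int) :
    (PySem.List.pyRange 0 (xs.length : Int) 1).foldl (solutionStep xs) ((0, 0, 0) : Int × Int × Int)
      = (pvScore xs [1,2,3,4,5], pvScore xs [2,1,2,3,2,4,2,5], pvScore xs [3,3,1,1,2,2,4,4,5,5]) := by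
  induction xs using List.reverseRecOn with
  | nil => rfl
  | append_singleton ys y ih =>
      have hlen : (((ys ++ [y]).length : Nat) : Int) = (ys.length : Int) + 1 := by simp
      rw [hlen, PySem.List.pyRange_one_succ_right (by exact_mod_cast Nat.zero_le ys.length),
          List.foldl_append,
          PySem.List.foldl_congr_mem (PySem.List.pyRange 0 (ys.length : Int) 1)
            (solutionStep (ys ++ [y])) (solutionStep ys) ((0, 0, 0) : Int × Int × Int)
            (fun acc i hi => by
            obtain ⟨hh0, hh1⟩ := PySem.List.mem_pyRange_one.mp hi
            exact pvStep_congr ys y acc i hh0 hh1),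
          ih]
      simp only [List.foldl_cons, List.foldl_nil]
      rw [pvScore_append, pvScore_append, pvScore_append]
      unfold solutionStep
      rw [pvGetD_append_last]
      norm_num
      split_ifs <;> simp

-- sum over the 40 residues of per-key counts = one countP over the pair list
lemma pvSumCount (L : List (Int × Int)) (g : Int → Int)
    (h : ∀ q ∈ L, 0 ≤ q.1 ∧ q.1 < 40) :
    ((PySem.List.pyRange 0 40 1).map (fun r => (L.count (r, g r) : Int))).sum
      = (L.countP (fun q => q.2 == g q.1) : Int) := by
  induction L with
  | nil => simp
  | cons q L ih =>
      have hq := h q (List.mem_cons_self ..)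
      have hrest : ∀ x ∈ L, 0 ≤ x.1 ∧ x.1 < 40 := fun x hx => h x (List.mem_cons_of_mem _ hx)
      have hsplit :
          ((PySem.List.pyRange 0 40 1).map (fun r => ((q :: L).count (r, g r) : Int))).sum
            = ((PySem.List.pyRange 0 40 1).map (fun r => (L.count (r, g r) : Int))).sum
              + ((PySem.List.pyRange 0 40 1).map
                  (fun r => if (r, g r) = q then (1 : Int) else 0)).sum := by
        rw [← List.sum_map_add]
        refine congrArg List.sum (List.map_congr_left ?_)
        intro r _
        rw [List.count_cons]
        push_cast
        by_cases hqr : (r, g r) = q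
        · simp [hqr]
        · simp [hqr, Ne.symm hqr]
      rw [hsplit, ih hrest, List.countP_cons]
      by_cases hv : g q.1 = q.2
      · have h1 :
            ((PySem.List.pyRange 0 40 1).map (fun r => if (r, g r) = q then (1 : Int) else 0)).sum
              = ((PySem.List.pyRange 0 40 1).map (fun r => if r = q.1 then (1 : Int) else 0)).sum := by
          refine congrArg List.sum (List.map_congr_left ?_)
          intro r _
          by_cases hr : r = q.1
          · subst hr; simp [hv]
          · simp [Prod.ext_iff, hr]
        have h2 : ((PySem.List.pyRange 0 40 1).map (fun r => if r = q.1 then (1 : Int) else 0)).sum = 1 := by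
          rw [show (fun r : Int => if r = q.1 then (1 : Int) else 0)
                = (fun r : Int => if (r == q.1) = true then (1 : Int) else 0) from
              funext (fun r => by simp), PySem.List.sum_map_ite_one_zero]
          rw [show (PySem.List.pyRange 0 40 1).countP (· == q.1) = (PySem.List.pyRange 0 40 1).count q.1 from rfl,
              List.count_eq_one_of_mem (PySem.List.nodup_pyRange_one 0 40)
                (PySem.List.mem_pyRange_one.mpr ⟨hq.1, hq.2⟩)]
          rfl
        rw [h1, h2]
        have hb : (q.2 == g q.1) = true := by simp [hv]
        rw [hb]
        simp only [if_true]
        push_cast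
        omega
      · have h0 :
            ((PySem.List.pyRange 0 40 1).map (fun r => if (r, g r) = q then (1 : Int) else 0)).sum
              = 0 := by
          rw [List.sum_eq_zero]
          intro x hx
          obtain ⟨r, _, hr⟩ := List.mem_map.mp hx
          have : ¬ (r, g r) = q := by
            intro he
            apply hv
            rw [← he]
          simp only [this, if_false] at hr
          omega
        rw [h0]
        have : (q.2 == g q.1) = false := by
          simp [Ne.symm hv]
        simp [this]
  
-- the dict score over residues mod 40 equals A's per-answer count, for any pattern whose length divides 40
lemma pvDictScore_eq (answers p : List Int) (hp : 0 < p.length) (hd : ((p.length : Int)) ∣ 40) :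
    pvDictScore (pvFreq answers) p = pvScore answers p := by
  have hlp : (0 : Int) < (p.length : Int) := by exact_mod_cast hp
  -- the building loop is a counter over the mapped key list
  have hfreq : pvFreq answers
      = PySem.Dict.counter ((PySem.List.enumerate answers).map (fun ia => (PySem.Int.mod ia.1 40, ia.2))) := by
    unfold pvFreq
    rw [← PySem.Dict.foldl_insert_getD_add_one_eq_counter, List.foldl_map]
  unfold pvDictScore
  rw [hfreq]
  have hgetD : ∀ r : Int,
      (PySem.Dict.counter ((PySem.List.enumerate answers).map (fun ia => (PySem.Int.mod ia.1 40, ia.2)))).getD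
          (r, PySem.List.pyGetD p (PySem.Int.mod r (p.length : Int)) 0) 0
        = (((PySem.List.enumerate answers).map (fun ia => (PySem.Int.mod ia.1 40, ia.2))).count
            (r, PySem.List.pyGetD p (PySem.Int.mod r (p.length : Int)) 0) : Int) := by
    intro r
    rw [PySem.Dict.getD_counter]
  have hmem : ∀ q ∈ (PySem.List.enumerate answers).map (fun ia => (PySem.Int.mod ia.1 40, ia.2)),
      0 ≤ q.1 ∧ q.1 < 40 := by
    intro q hq
    obtain ⟨ia, _, rfl⟩ := List.mem_map.mp hq
    exact ⟨PySem.Int.mod_nonneg _ (by norm_num), PySem.Int.mod_lt _ (by norm_num)⟩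
  calc ((PySem.List.pyRange 0 40 1).map
          (fun r => (PySem.Dict.counter ((PySem.List.enumerate answers).map (fun ia => (PySem.Int.mod ia.1 40, ia.2)))).getD
            (r, PySem.List.pyGetD p (PySem.Int.mod r (p.length : Int)) 0) 0)).sum
      = ((PySem.List.pyRange 0 40 1).map
          (fun r => (((PySem.List.enumerate answers).map (fun ia => (PySem.Int.mod ia.1 40, ia.2))).count
            (r, PySem.List.pyGetD p (PySem.Int.mod r (p.length : Int)) 0) : Int))).sum := by
        exact congrArg List.sum (List.map_congr_left (fun r _ => hgetD r))
    _ = (((PySem.List.enumerate answers).map (fun ia => (PySem.Int.mod ia.1 40, ia.2))).countP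
          (fun q => q.2 == PySem.List.pyGetD p (PySem.Int.mod q.1 (p.length : Int)) 0) : Int) := by
        exact pvSumCount _ _ hmem
    _ = ((PySem.List.enumerate answers).countP
          (fun ia => ia.2 == PySem.List.pyGetD p (PySem.Int.mod (PySem.Int.mod ia.1 40) (p.length : Int)) 0) : Int) := by
        rw [List.countP_map]
        rfl
    _ = ((PySem.List.enumerate answers).countP
          (fun ia => ia.2 == PySem.List.pyGetD p (PySem.Int.mod ia.1 (p.length : Int)) 0) : Int) := by
        congr 1
        refine List.countP_congr ?_
        intro ia hia
        have h0 : 0 ≤ ia.1 := by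
          have : ia.1 ∈ (PySem.List.enumerate answers).map (·.1) := List.mem_map_of_mem hia
          rw [PySem.List.map_fst_enumerate] at this
          exact (PySem.List.mem_pyRange_one.mp this).1
        have hmm : PySem.Int.mod (PySem.Int.mod ia.1 40) (p.length : Int) = PySem.Int.mod ia.1 (p.length : Int) := by
          rw [PySem.Int.mod_eq_emod_of_pos (by norm_num : (0:Int) < 40),
              PySem.Int.mod_eq_emod_of_pos hlp, PySem.Int.mod_eq_emod_of_pos hlp,
              Int.emod_emod_of_dvd _ hd]
        rw [hmm]
    _ = pvScore answers p := by
        unfold pvScore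
        rw [← PySem.List.sum_map_ite_one_zero
              (fun ia : Int × Int => ia.2 == PySem.List.pyGetD p (PySem.Int.mod ia.1 (p.length : Int)) 0)]
        simp

lemma pvMax3 (a b c : Int) :
    (PySem.List.max? [a, b, c] (fun s => s)).getD 0 = max a (max b c) := by
  by_cases h1 : a < b <;> by_cases h2 : a < c <;> by_cases h3 : b < c <;>
    simp [PySem.List.max?, h1, h2, h3] <;> omega

lemma pvFinal (a b c : Int) :
    (if max a (max b c) = a then [(1 : Int)] else []) ++ (if max a (max b c) = b then [2] else [])
        ++ (if max a (max b c) = c then [3] else [])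
      = ((PySem.List.enumerate [a, b, c]).filter
            (fun js => js.2 == (PySem.List.max? [a, b, c] (fun s => s)).getD 0)).map (fun js => js.1 + 1) := by
  simp only [pvMax3]
  rw [show PySem.List.enumerate [a, b, c] = [(0, a), (1, b), (2, c)] from rfl]
  simp only [List.filter_cons, List.filter_nil, beq_iff_eq]
  split_ifs <;> simp <;> omega

-- ===== VERDICT =====
theorem solution_spec : Claim_equal_solution := by
  intro answers _
  show solution answers = solution_alt answers
  simp only [solution, solution_alt, List.map, pvLoop,
    pvDictScore_eq answers [1,2,3,4,5] (by decide) (by decide),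
    pvDictScore_eq answers [2,1,2,3,2,4,2,5] (by decide) (by decide),
    pvDictScore_eq answers [3,3,1,1,2,2,4,4,5,5] (by decide) (by decide)]
  exact pvFinal _ _ _
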